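-- pv_equiv track=rewrite | github.com/davidggarciiia/PROYECTO-FINAL | georetail/backend/pipelines/scraping/booking_scraper.py | _es_captcha
-- ===== SOURCE A (Python) =====
-- def _es_captcha(html: str) -> bool:
--     """Detecta si la respuesta es una página de CAPTCHA o bloqueo."""
--     indicadores = [
--         "captcha",
--         "robot",
--         "automated access",
--         "acceso automatizado",
--         "cf-challenge",
--         "datadome",
--         "px-captcha",
--         "distil_",
--     ]
--     html_lower = html.lower()
--     return any(ind in html_lower for ind in indicadores)
-- ===== SOURCE B (Python) =====
-- # Hand-written single-pass multi-pattern matcher: indicators bucketed by first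
-- # character; one scan over the lowered text, checking only same-initial suffixes.
-- _POR_INICIAL = {
--     "c": ("aptcha", "f-challenge"),
--     "r": ("obot",),
--     "a": ("utomated access", "cceso automatizado"),
--     "d": ("atadome", "istil_"),
--     "p": ("x-captcha",),
-- }
--
--
-- def _es_captcha(html: str) -> bool:
--     """Detecta si la respuesta es una página de CAPTCHA o bloqueo."""
--     s = html.lower()
--     for i, c in enumerate(s):
--         for resto in _POR_INICIAL.get(c, ()):
--             if s.startswith(resto, i + 1):
--                 return True
--     return False
-- ===== Notes on version B (the rewrite author's own statement) =====
-- stated objective: alternative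
-- what changed: Replaces the eight independent substring-membership scans with a hand-written single left-to-right scan of the lowered text that dispatches each position through a first-character bucket table and prefix-checks only the matching buckets' suffixes.
import Mathlib
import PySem

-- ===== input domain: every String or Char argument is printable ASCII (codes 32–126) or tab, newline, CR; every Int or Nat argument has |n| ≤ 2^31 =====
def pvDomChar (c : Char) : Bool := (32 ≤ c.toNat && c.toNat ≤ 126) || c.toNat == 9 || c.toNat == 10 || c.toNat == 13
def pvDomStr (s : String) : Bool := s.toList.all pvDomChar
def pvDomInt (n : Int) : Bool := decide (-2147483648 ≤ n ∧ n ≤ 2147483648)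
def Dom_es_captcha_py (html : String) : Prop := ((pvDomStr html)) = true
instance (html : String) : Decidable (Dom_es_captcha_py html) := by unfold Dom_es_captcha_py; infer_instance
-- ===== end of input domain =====

-- B replaces A's eight substring-membership scans with one hand-written left-to-right
-- scan dispatching each position through a first-character bucket table; same result.


-- ===== PORT A =====
-- literal port of A: list of indicators, lower the html, any(ind in html_lower)
def es_captcha_py (html : String) : Bool :=
  let indicadores : List String :=
    ["captcha", "robot", "automated access", "acceso automatizado",
     "cf-challenge", "datadome", "px-captcha", "distil_"]
  let html_lower := PySem.Str.lower html
  indicadores.any (fun ind => PySem.Str.isIn ind html_lower)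

-- ===== PORT B =====
-- the first-character bucket table _POR_INICIAL (keys are single chars in Source B)
def pvPorInicial : PySem.Dict Char (List (List Char)) :=
  PySem.Dict.mk
    [('c', ["aptcha".toList, "f-challenge".toList]),
     ('r', ["obot".toList]),
     ('a', ["utomated access".toList, "cceso automatizado".toList]),
     ('d', ["atadome".toList, "istil_".toList]),
     ('p', ["x-captcha".toList])]

-- the scan loop of _es_captcha: at each position, prefix-check the bucket of the char
def pvScan : List Char → Bool
  | [] => false
  | c :: rest =>
    if (PySem.Dict.getD pvPorInicial c []).any (fun p => p.isPrefixOf rest) then true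
    else pvScan rest

def es_captcha_py_alt (html : String) : Bool :=
  pvScan (PySem.Str.lower html).toList

-- ===== PRECONDITION & SPEC =====
def Spec_es_captcha_py (html : String) (out : Bool) : Prop := out = es_captcha_py_alt html
instance (html : String) (out : Bool) : Decidable (Spec_es_captcha_py html out) := by unfold Spec_es_captcha_py; infer_instance

-- ===== CLAIM (what is proved, stated in full; the proofs are below) =====
def Claim_equal_es_captcha_py : Prop := ∀ (html : String), Dom_es_captcha_py html → Spec_es_captcha_py html (es_captcha_py html)

-- ===== LEMMAS AND PROOFS =====

-- the full indicator list, as char lists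
def pvIndicadores : List (List Char) :=
  ["captcha".toList, "robot".toList, "automated access".toList, "acceso automatizado".toList,
   "cf-challenge".toList, "datadome".toList, "px-captcha".toList, "distil_".toList]

-- bucket dispatch at one position = prefix test of every full indicator there
set_option maxRecDepth 8000 in
theorem pvBucket_eq (c : Char) (rest : List Char) :
    ((PySem.Dict.getD pvPorInicial c []).any (fun p => p.isPrefixOf rest)) =
      pvIndicadores.any (fun ind => ind.isPrefixOf (c :: rest)) := by
  have hi : pvIndicadores =
      [['c','a','p','t','c','h','a'], ['r','o','b','o','t'],
       ['a','u','t','o','m','a','t','e','d',' ','a','c','c','e','s','s'],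
       ['a','c','c','e','s','o',' ','a','u','t','o','m','a','t','i','z','a','d','o'],
       ['c','f','-','c','h','a','l','l','e','n','g','e'],
       ['d','a','t','a','d','o','m','e'],
       ['p','x','-','c','a','p','t','c','h','a'],
       ['d','i','s','t','i','l','_']] := by decide
  have hd : pvPorInicial = PySem.Dict.mk
      [('c', [['a','p','t','c','h','a'], ['f','-','c','h','a','l','l','e','n','g','e']]),
       ('r', [['o','b','o','t']]),
       ('a', [['u','t','o','m','a','t','e','d',' ','a','c','c','e','s','s'],
              ['c','c','e','s','o',' ','a','u','t','o','m','a','t','i','z','a','d','o']]),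
       ('d', [['a','t','a','d','o','m','e'], ['i','s','t','i','l','_']]),
       ('p', [['x','-','c','a','p','t','c','h','a']])] := by decide
  rw [hi, hd]
  simp only [PySem.Dict.getD, PySem.Dict.get?_mk_cons]
  by_cases h1 : c = 'c'
  · subst h1; simp [List.isPrefixOf]
  by_cases h2 : c = 'r'
  · subst h2; simp [List.isPrefixOf]
  by_cases h3 : c = 'a'
  · subst h3; simp [List.isPrefixOf]
  by_cases h4 : c = 'd'
  · subst h4; simp [List.isPrefixOf]
  by_cases h5 : c = 'p'
  · subst h5; simp [List.isPrefixOf]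
  simp [PySem.Dict.get?, List.isPrefixOf,
    beq_eq_false_iff_ne.mpr (Ne.symm h1), beq_eq_false_iff_ne.mpr (Ne.symm h2),
    beq_eq_false_iff_ne.mpr (Ne.symm h3), beq_eq_false_iff_ne.mpr (Ne.symm h4),
    beq_eq_false_iff_ne.mpr (Ne.symm h5)]

-- the single scan succeeds iff some indicator is an infix of the text
theorem pvScan_iff (s : List Char) :
    pvScan s = true ↔ ∃ p ∈ pvIndicadores, p <:+: s := by
  induction s with
  | nil => simp [pvScan, pvIndicadores, List.infix_nil]
  | cons c rest ih =>
    rw [pvScan, pvBucket_eq]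
    by_cases h : pvIndicadores.any (fun ind => ind.isPrefixOf (c :: rest)) = true
    · rw [if_pos h]
      simp only [List.any_eq_true, List.isPrefixOf_iff_prefix] at h
      obtain ⟨p, hp, hpre⟩ := h
      exact iff_of_true rfl ⟨p, hp, hpre.isInfix⟩
    · rw [if_neg h, ih]
      simp only [List.any_eq_true, List.isPrefixOf_iff_prefix, not_exists, not_and] at h
      constructor
      · rintro ⟨p, hp, hinf⟩; exact ⟨p, hp, List.infix_cons hinf⟩
      · rintro ⟨p, hp, hinf⟩
        rcases List.infix_cons_iff.mp hinf with hpre | htail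
        · exact absurd hpre (h p hp)
        · exact ⟨p, hp, htail⟩

-- ===== VERDICT (by name: the statement is the Claim_ definition above) =====
theorem es_captcha_py_spec : Claim_equal_es_captcha_py := by
  intro html _
  unfold Spec_es_captcha_py es_captcha_py es_captcha_py_alt
  rw [Bool.eq_iff_iff, pvScan_iff]
  have hpat : pvIndicadores =
      (["captcha", "robot", "automated access", "acceso automatizado",
        "cf-challenge", "datadome", "px-captcha", "distil_"] : List String).map String.toList := rfl
  simp only [List.any_eq_true, PySem.Str.isIn_iff_infix, hpat, List.mem_map]
  constructor
  · rintro ⟨ind, hind, hinf⟩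
    exact ⟨ind.toList, ⟨ind, hind, rfl⟩, hinf⟩
  · rintro ⟨p, ⟨ind, hind, rfl⟩, hinf⟩
    exact ⟨ind, hind, hinf⟩
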